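-- pv_equiv track=rewrite | github.com/ThyPandaKing/Bytify | Main.py | address_to_values
-- ===== SOURCE A (Python) =====
-- def address_to_values(address, offset_bits, index_bits):
--     index = 0
--     offset = 0
--     tag = 0
--     temp = []
--     ind = 0
--     while ind < offset_bits:
--         ind += 1
--         temp.append(address % 2)
--         address //= 2
--
--     ind = 1
--     for i in temp:
--         offset += i*ind
--         ind *= 2
--
--     temp = []
--     ind = 0
--     while ind < index_bits:
--         ind += 1
--         temp.append(address % 2)
--         address //= 2
--
--     ind = 1
--     for i in temp:
--         index += i*ind
--         ind *= 2
--
--     tag = address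
--
--     return tag, index, offset
-- ===== SOURCE B (Python) =====
-- def address_to_values(address, offset_bits, index_bits):
--     # O(1) bit ops: mask/shift instead of per-bit loops
--     ob = max(offset_bits, 0)
--     ib = max(index_bits, 0)
--     offset = address % (1 << ob)
--     address //= (1 << ob)
--     index = address % (1 << ib)
--     tag = address // (1 << ib)
--     return tag, index, offset
-- ===== Notes on version B (the rewrite author's own statement) =====
-- stated objective: faster
-- what changed: Replaces the per-bit while-loops and weighted-sum reconstruction with a single mask (mod 2^k) and shift (floor-div by 2^k) per field.
import Mathlib
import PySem

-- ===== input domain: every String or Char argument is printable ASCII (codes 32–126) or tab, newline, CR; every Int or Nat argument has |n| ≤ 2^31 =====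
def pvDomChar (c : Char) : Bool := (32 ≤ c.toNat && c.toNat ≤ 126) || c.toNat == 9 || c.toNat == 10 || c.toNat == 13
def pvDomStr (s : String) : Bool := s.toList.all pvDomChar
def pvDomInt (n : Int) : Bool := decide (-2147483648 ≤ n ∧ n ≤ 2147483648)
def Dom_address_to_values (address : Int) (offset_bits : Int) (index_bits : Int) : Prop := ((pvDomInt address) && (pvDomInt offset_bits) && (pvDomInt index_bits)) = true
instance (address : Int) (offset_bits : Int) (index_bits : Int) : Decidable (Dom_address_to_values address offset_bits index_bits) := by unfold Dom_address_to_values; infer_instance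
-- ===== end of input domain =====

-- ===== PORT A =====
-- One honest line: B replaces A's per-bit while-loops with one mod/floor-div by 2^k per field (objective: faster).
-- while ind < offset_bits: runs offset_bits.toNat iterations, appending address % 2 and flooring address //= 2
def pvWhileBits (n : Nat) (temp : List Int) (address : Int) : List Int × Int :=
  match n with
  | 0 => (temp, address)
  | n + 1 => pvWhileBits n (temp ++ [PySem.Int.mod address 2]) (PySem.Int.floordiv address 2)

-- for i in temp: offset += i*ind; ind *= 2
def pvSumLoop (temp : List Int) : Int :=
  (temp.foldl (fun p i => (p.1 + i * p.2, p.2 * 2)) ((0 : Int), (1 : Int))).1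

def address_to_values (address : Int) (offset_bits : Int) (index_bits : Int) : List Int :=
  let r1 := pvWhileBits offset_bits.toNat [] address
  let offset := pvSumLoop r1.1
  let r2 := pvWhileBits index_bits.toNat [] r1.2
  let index := pvSumLoop r2.1
  let tag := r2.2
  [tag, index, offset]

-- ===== PORT B =====
def address_to_values_alt (address : Int) (offset_bits : Int) (index_bits : Int) : List Int :=
  let ob := (max offset_bits 0).toNat
  let ib := (max index_bits 0).toNat
  let offset := PySem.Int.mod address (2 ^ ob)
  let address1 := PySem.Int.floordiv address (2 ^ ob)
  let index := PySem.Int.mod address1 (2 ^ ib)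
  let tag := PySem.Int.floordiv address1 (2 ^ ib)
  [tag, index, offset]

-- ===== PRECONDITION & SPEC =====
def Spec_address_to_values (address : Int) (offset_bits : Int) (index_bits : Int) (out : List Int) : Prop := out = address_to_values_alt address offset_bits index_bits
instance (address : Int) (offset_bits : Int) (index_bits : Int) (out : List Int) : Decidable (Spec_address_to_values address offset_bits index_bits out) := by unfold Spec_address_to_values; infer_instance

-- ===== CLAIM (what is proved, stated in full; the proofs are below) =====
def Claim_equal_address_to_values : Prop := ∀ (address : Int) (offset_bits : Int) (index_bits : Int), Dom_address_to_values address offset_bits index_bits → Spec_address_to_values address offset_bits index_bits (address_to_values address offset_bits index_bits)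

-- ===== LEMMAS AND PROOFS =====

-- the list of low bits of a, least significant first
def pvBits : Nat → Int → List Int
  | 0, _ => []
  | n + 1, a => PySem.Int.mod a 2 :: pvBits n (PySem.Int.floordiv a 2)

lemma pvWhileBits_eq (n : Nat) (temp : List Int) (a : Int) :
    pvWhileBits n temp a = (temp ++ pvBits n a, PySem.Int.floordiv a (2 ^ n)) := by
  induction n generalizing temp a with
  | zero => simp [pvWhileBits, pvBits, PySem.Int.floordiv]
  | succ n ih =>
    simp [pvWhileBits, pvBits, ih]
    rw [Int.ediv_ediv_eq_ediv_mul]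
    · ring_nf
    · norm_num

lemma pvMod_split (a : Int) (n : Nat) :
    PySem.Int.mod a (2 ^ (n + 1)) =
      PySem.Int.mod a 2 + 2 * PySem.Int.mod (PySem.Int.floordiv a 2) (2 ^ n) := by
  rw [PySem.Int.mod_eq_emod_of_pos (by positivity), PySem.Int.mod_eq_emod_of_pos (by norm_num : (0:Int) < 2), PySem.Int.mod_eq_emod_of_pos (by positivity), PySem.Int.floordiv_eq_ediv_of_pos (by norm_num : (0:Int) < 2)]
    -- a % 2^(n+1) = a % 2 + 2 * ((a/2) % 2^n)
  have h2 : ((2:Int) ^ (n+1)) = 2 * 2 ^ n := by ring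
  have ha : a = 2 * (a / 2) + a % 2 := (Int.ediv_add_emod a 2).symm -- decomposition
  have hb : a / 2 = 2 ^ n * ((a / 2) / 2 ^ n) + (a / 2) % 2 ^ n := (Int.ediv_add_emod _ _).symm
  have hlt : a % 2 + 2 * ((a / 2) % 2 ^ n) < 2 * 2 ^ n := by
    have := Int.emod_lt_of_pos a (by norm_num : (0:Int) < 2)
    have := Int.emod_lt_of_pos (a / 2) (by positivity : (0:Int) < 2 ^ n)
    omega
  have hge : 0 ≤ a % 2 + 2 * ((a / 2) % 2 ^ n) := by
    have := Int.emod_nonneg a (by norm_num : (2:Int) ≠ 0)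
    have := Int.emod_nonneg (a / 2) (by positivity : (2:Int) ^ n ≠ 0)
    omega
  have key : a = (a % 2 + 2 * ((a / 2) % 2 ^ n)) + (2 * 2 ^ n) * ((a / 2) / 2 ^ n) := by
    nlinarith [ha, hb]
  calc a % 2 ^ (n+1) = ((a % 2 + 2 * ((a / 2) % 2 ^ n)) + (2 * 2 ^ n) * ((a / 2) / 2 ^ n)) % (2 * 2 ^ n) := by rw [← key, h2]
    _ = (a % 2 + 2 * ((a / 2) % 2 ^ n)) % (2 * 2 ^ n) := by rw [Int.add_mul_emod_self_left]
    _ = a % 2 + 2 * ((a / 2) % 2 ^ n) := Int.emod_eq_of_lt hge hlt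

lemma pvSum_bits (n : Nat) (a s ind : Int) :
    (pvBits n a).foldl (fun p i => (p.1 + i * p.2, p.2 * 2)) (s, ind) =
      (s + ind * PySem.Int.mod a (2 ^ n), ind * 2 ^ n) := by
  induction n generalizing a s ind with
  | zero =>
    simp [pvBits, PySem.Int.mod]
  | succ n ih =>
    simp only [pvBits, List.foldl_cons, ih, pvMod_split a n]
    refine Prod.ext ?_ ?_ <;> simp <;> ring

lemma pvSumLoop_bits (n : Nat) (a : Int) :
    pvSumLoop (pvBits n a) = PySem.Int.mod a (2 ^ n) := by
  simp [pvSumLoop, pvSum_bits]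

lemma toNat_max (k : Int) : k.toNat = (max k 0).toNat := by omega

-- ===== VERDICT (by name: the statement is the Claim_ definition above) =====
theorem address_to_values_spec : Claim_equal_address_to_values := by
  intro address offset_bits index_bits _
  unfold Spec_address_to_values address_to_values address_to_values_alt
  simp only [pvWhileBits_eq, List.nil_append, pvSumLoop_bits]
  rw [← toNat_max offset_bits, ← toNat_max index_bits]
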